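-- pv_equiv track=rewrite | github.com/ahmadh84/kdbx_brute_search | search_kdbx.py | n_total_choices
-- ===== SOURCE A (Python) =====
-- import itertools
-- import math
--
-- def n_total_choices(
--     optional_list: list[list[str]],
--     compulsory_list: list[list[str]],
--     min_optional: int
-- ) -> int:
--   optional_count = [len(words) for words in optional_list]
--   comp_count = [len(words) for words in compulsory_list]
--   comp_n_choices = math.prod(comp_count) * math.factorial(len(compulsory_list))
--   total_n_choices = 0
--   for n_optional in range(min_optional, len(optional_list)+1):
--     total_n_words = len(compulsory_list) + n_optional
--     common_perm_count = math.factorial(total_n_words) // math.factorial(total_n_words - n_optional)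
--     common_perm_count *= comp_n_choices
--     word_choice_count = [
--         math.prod(c) * common_perm_count for c in itertools.combinations(optional_count, n_optional)
--     ]
--     total_n_choices += sum(word_choice_count)
--   return total_n_choices
-- ===== SOURCE B (Python) =====
-- import math
--
-- def _esym(counts):
--     # elementary symmetric polynomials e_0..e_len(counts) of the counts,
--     # built by structural recursion on the list (O(n^2) total)
--     if not counts:
--         return [1]
--     c = counts[0]
--     rest = _esym(counts[1:])
--     return [x + c * y for x, y in zip(rest + [0], [0] + rest)]
--
-- def n_total_choices(
--     optional_list: list[list[str]],
--     compulsory_list: list[list[str]],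
--     min_optional: int
-- ) -> int:
--   comp_prod = math.prod(len(words) for words in compulsory_list)
--   e = _esym([len(words) for words in optional_list])
--   m = len(compulsory_list)
--   return comp_prod * sum(
--       ek * math.factorial(m + k) for k, ek in enumerate(e) if k >= min_optional
--   )
-- ===== Notes on version B (the rewrite author's own statement) =====
-- stated objective: alternative
-- what changed: B replaces A's per-size enumeration of all itertools.combinations by a dynamic program computing the elementary symmetric polynomials e_k of the optional word counts, then sums e_k * (m+k)! * prod(compulsory counts).
import Mathlib
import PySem

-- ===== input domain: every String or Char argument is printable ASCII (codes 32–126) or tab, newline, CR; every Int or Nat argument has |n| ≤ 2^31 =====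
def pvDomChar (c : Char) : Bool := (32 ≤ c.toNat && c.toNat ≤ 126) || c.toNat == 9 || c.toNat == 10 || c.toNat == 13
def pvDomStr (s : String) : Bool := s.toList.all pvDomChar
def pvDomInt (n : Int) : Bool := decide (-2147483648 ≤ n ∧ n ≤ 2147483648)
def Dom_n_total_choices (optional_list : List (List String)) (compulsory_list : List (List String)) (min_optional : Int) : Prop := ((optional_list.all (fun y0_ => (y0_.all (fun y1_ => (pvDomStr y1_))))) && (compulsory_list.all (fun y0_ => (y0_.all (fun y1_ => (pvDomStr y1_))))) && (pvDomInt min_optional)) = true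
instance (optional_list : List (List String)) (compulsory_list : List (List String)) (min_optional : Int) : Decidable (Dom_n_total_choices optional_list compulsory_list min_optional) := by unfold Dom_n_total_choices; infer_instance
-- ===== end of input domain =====

-- B replaces A's enumeration of itertools.combinations by an elementary-symmetric-polynomial DP (objective: alternative).

-- ===== PORT A =====
-- math.factorial on a Python int; every argument it receives is nonnegative on the inputs Pre_ admits
def pyFact (i : Int) : Int := (Nat.factorial i.toNat : Int)

-- itertools.combinations(xs, r), in itertools' emission order
def combos : List Int → Nat → List (List Int)
  | _, 0 => [[]]
  | [], _ + 1 => []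
  | x :: xs, k + 1 => (combos xs k).map (fun c => x :: c) ++ combos xs (k + 1)

def n_total_choices (optional_list : List (List String)) (compulsory_list : List (List String)) (min_optional : Int) : Int :=
  let optional_count := optional_list.map (fun words => (words.length : Int))
  let comp_count := compulsory_list.map (fun words => (words.length : Int))
  let comp_n_choices := comp_count.foldl (· * ·) 1 * (Nat.factorial compulsory_list.length : Int)
  (PySem.List.pyRange min_optional ((optional_list.length : Int) + 1) 1).foldl
    (fun total_n_choices n_optional =>
      let total_n_words : Int := (compulsory_list.length : Int) + n_optional
      let common_perm_count :=
        PySem.Int.floordiv (pyFact total_n_words) (pyFact (total_n_words - n_optional)) * comp_n_choices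
      let word_choice_count :=
        (combos optional_count n_optional.toNat).map (fun c => c.foldl (· * ·) 1 * common_perm_count)
      total_n_choices + word_choice_count.sum) 0

-- ===== PORT B =====
-- _esym: elementary symmetric polynomials e_0..e_n, structural recursion on the list (Source B's _esym)
def esymList : List Int → List Int
  | [] => [1]
  | c :: rest =>
      let r := esymList rest
      ((r ++ [0]).zip (0 :: r)).map (fun (p : Int × Int) => p.1 + c * p.2)

def n_total_choices_alt (optional_list : List (List String)) (compulsory_list : List (List String)) (min_optional : Int) : Int :=
  let comp_prod := (compulsory_list.map (fun words => (words.length : Int))).foldl (· * ·) 1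
  let e := esymList (optional_list.map (fun words => (words.length : Int)))
  let m := compulsory_list.length
  comp_prod *
    (((PySem.List.enumerate e 0).filter (fun p => decide (min_optional ≤ p.1))).map
        (fun p => p.2 * (Nat.factorial (m + p.1.toNat) : Int))).sum

-- ===== PRECONDITION & SPEC =====
-- Pre_ excludes only min_optional < 0, where the Python A always raises ValueError
-- (math.factorial / itertools.combinations with a negative argument); A returns on everything else.
def Pre_n_total_choices (optional_list : List (List String)) (compulsory_list : List (List String)) (min_optional : Int) : Prop := 0 ≤ min_optional
instance (optional_list : List (List String)) (compulsory_list : List (List String)) (min_optional : Int) : Decidable (Pre_n_total_choices optional_list compulsory_list min_optional) := by unfold Pre_n_total_choices; infer_instance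

def pvWitness_n_total_choices : List (List String) × List (List String) × Int := ([["a"], ["b", "c"]], [["x"]], 1)

def Spec_n_total_choices (optional_list : List (List String)) (compulsory_list : List (List String)) (min_optional : Int) (out : Int) : Prop := out = n_total_choices_alt optional_list compulsory_list min_optional
instance (optional_list : List (List String)) (compulsory_list : List (List String)) (min_optional : Int) (out : Int) : Decidable (Spec_n_total_choices optional_list compulsory_list min_optional out) := by unfold Spec_n_total_choices; infer_instance

-- ===== CLAIM (what is proved, stated in full; the proofs are below) =====
def Claim_equal_n_total_choices : Prop := ∀ (optional_list : List (List String)) (compulsory_list : List (List String)) (min_optional : Int), Dom_n_total_choices optional_list compulsory_list min_optional → Pre_n_total_choices optional_list compulsory_list min_optional → Spec_n_total_choices optional_list compulsory_list min_optional (n_total_choices optional_list compulsory_list min_optional)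

-- ===== LEMMAS AND PROOFS =====

-- sum of products over A's combinations (what each inner comprehension of A totals, without the constant factor)
def Ssum (xs : List Int) (k : Nat) : Int := ((combos xs k).map (fun c => c.foldl (· * ·) 1)).sum

theorem combos_eq_nil (xs : List Int) (k : Nat) (h : xs.length < k) : combos xs k = [] := by
  induction xs generalizing k with
  | nil => cases k with
    | zero => omega
    | succ k => rfl
  | cons x xs ih =>
    cases k with
    | zero => simp at h
    | succ k =>
      simp only [List.length_cons] at h
      simp [combos, ih k (by omega), ih (k+1) (by omega)]

theorem Ssum_eq_zero (xs : List Int) (k : Nat) (h : xs.length < k) : Ssum xs k = 0 := by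
  simp [Ssum, combos_eq_nil xs k h]

theorem foldl_mul_shift (c : List Int) (a : Int) : c.foldl (· * ·) a = a * c.foldl (· * ·) 1 := by
  have : c.foldl (· * ·) (a * 1) = a * c.foldl (· * ·) 1 := List.foldl_assoc
  simpa using this

theorem Ssum_zero (xs : List Int) : Ssum xs 0 = 1 := by
  cases xs <;> simp [Ssum, combos]

theorem Ssum_cons (x : Int) (xs : List Int) (k : Nat) :
    Ssum (x :: xs) (k + 1) = x * Ssum xs k + Ssum xs (k + 1) := by
  simp only [Ssum, combos, List.map_append, List.sum_append, List.map_map]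
  congr 1
  rw [show ((fun c => List.foldl (· * ·) 1 c) ∘ fun c => x :: c)
        = fun (c : List Int) => x * List.foldl (· * ·) 1 c from
      funext fun c => by
        simp only [Function.comp, List.foldl_cons]
        simpa using foldl_mul_shift c (1 * x)]
  exact List.sum_map_mul_left _ _ _

theorem getD_append_zero (r : List Int) (k : Nat) : (r ++ [0]).getD k 0 = r.getD k 0 := by
  induction r generalizing k with
  | nil => cases k <;> simp
  | cons a r ih =>
    cases k with
    | zero => simp
    | succ k =>
      simp only [List.cons_append, List.getD_cons_succ]
      exact ih k

theorem stepE_getD (c : Int) (e : List Int) (d : Int) (k : Nat) :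
    (((e ++ [0]).zip (d :: e)).map (fun (p : Int × Int) => p.1 + c * p.2)).getD k 0
      = (e ++ [0]).getD k 0 + c * (d :: e).getD k 0 := by
  induction e generalizing d k with
  | nil => cases k with
    | zero => simp
    | succ k => cases k <;> simp
  | cons a e ih =>
    cases k with
    | zero => simp
    | succ k =>
      simp only [List.cons_append, List.zip_cons_cons, List.map_cons, List.getD_cons_succ]
      exact ih a k

theorem esym_getD (xs : List Int) (k : Nat) : (esymList xs).getD k 0 = Ssum xs k := by
  induction xs generalizing k with
  | nil =>
    cases k with
    | zero => simp [esymList, Ssum_zero]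
    | succ k => simp [esymList, (Ssum_eq_zero [] (k+1) (by simp)).symm]
  | cons x xs ih =>
    show (((esymList xs ++ [0]).zip (0 :: esymList xs)).map (fun (p : Int × Int) => p.1 + x * p.2)).getD k 0 = _
    rw [stepE_getD, getD_append_zero]
    cases k with
    | zero => rw [List.getD_cons_zero, ih, Ssum_zero, Ssum_zero]; ring
    | succ k => rw [List.getD_cons_succ, ih, ih, Ssum_cons]; ring

-- B's filtered enumerate-sum, as a sum over List.range
theorem enum_sum (m : Nat) (mo : Int) (e : List Int) (j : Nat) :
    (((PySem.List.enumerate e (j : Int)).filter (fun p => decide (mo ≤ p.1))).map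
        (fun p => p.2 * (Nat.factorial (m + p.1.toNat) : Int))).sum
      = ((List.range e.length).map
          (fun (i : Nat) => if mo ≤ ((j + i : Nat) : Int) then e.getD i 0 * (Nat.factorial (m + (j + i)) : Int) else 0)).sum := by
  induction e generalizing j with
  | nil => simp [PySem.List.enumerate]
  | cons a e ih =>
    rw [PySem.List.enumerate_cons,
        show ((j : Int) + 1) = ((j + 1 : Nat) : Int) by push_cast; ring]
    rw [List.length_cons, List.range_succ_eq_map, List.map_cons, List.map_map, List.sum_cons]
    have htail : (List.range e.length).map
          ((fun (i : Nat) => if mo ≤ ((j + i : Nat) : Int) then (a :: e).getD i 0 * (Nat.factorial (m + (j + i)) : Int) else 0) ∘ Nat.succ)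
        = (List.range e.length).map
          (fun (i : Nat) => if mo ≤ ((j + 1 + i : Nat) : Int) then e.getD i 0 * (Nat.factorial (m + (j + 1 + i)) : Int) else 0) := by
      apply List.map_congr_left
      intro i _
      have h1 : j + (i + 1) = j + 1 + i := by omega
      simp [Function.comp, Nat.succ_eq_add_one, h1]
    rw [htail, ← ih (j + 1)]
    by_cases hmo : mo ≤ ((j : Nat) : Int)
    · rw [List.filter_cons_of_pos (by simpa using hmo), List.map_cons, List.sum_cons]
      simp [hmo]
    · rw [List.filter_cons_of_neg (by simpa using hmo)]
      simp [hmo]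

-- dropping the ite: a lower-bounded range sum
theorem range_ite_sum (T : Nat → Int) (μ N : Nat) :
    ((List.range N).map (fun (i : Nat) => if (μ : Int) ≤ (i : Int) then T i else 0)).sum
      = ((List.range (N - μ)).map (fun (k : Nat) => T (μ + k))).sum := by
  induction N with
  | zero => simp
  | succ N ih =>
    rw [List.range_succ, List.map_append, List.sum_append]
    by_cases h : μ ≤ N
    · have hN : N + 1 - μ = (N - μ) + 1 := by omega
      have h3 : (μ : Int) ≤ (N : Int) := by exact_mod_cast h
      rw [hN, List.range_succ, List.map_append, List.sum_append, ih]
      simp only [List.map_cons, List.map_nil, List.sum_cons, List.sum_nil, add_zero]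
      rw [if_pos h3]
      have h2 : μ + (N - μ) = N := by omega
      simp [h2]
    · have hN : N + 1 - μ = 0 := by omega
      have hN2 : N - μ = 0 := by omega
      have h3 : ¬ ((μ : Int) ≤ (N : Int)) := by
        intro hh; exact h (by exact_mod_cast hh)
      rw [hN2] at ih
      simp only [List.range_zero, List.map_nil, List.sum_nil] at ih
      simp only [List.map_cons, List.map_nil, List.sum_cons, List.sum_nil, add_zero]
      rw [if_neg h3, ih, hN]
      simp

-- the factorial/floor-division algebra of A's common_perm_count
theorem fact_fdiv (m i : Nat) :
    PySem.Int.floordiv (pyFact ((m : Int) + (i : Int))) (pyFact ((m : Int) + (i : Int) - (i : Int))) * (Nat.factorial m : Int)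
      = (Nat.factorial (m + i) : Int) := by
  have h2 : ((m : Int) + (i : Int) - (i : Int)) = ((m : Nat) : Int) := by push_cast; ring
  have h1 : ((m : Int) + (i : Int)) = ((m + i : Nat) : Int) := by push_cast; ring
  rw [h2, h1]
  simp only [pyFact, Int.toNat_natCast, PySem.Int.floordiv_natCast]
  rw [← Nat.cast_mul, Nat.div_mul_cancel (Nat.factorial_dvd_factorial (Nat.le_add_right m i))]

theorem esymList_length (xs : List Int) : (esymList xs).length = xs.length + 1 := by
  induction xs with
  | nil => rfl
  | cons c r ih => simp [esymList, ih]

-- ===== VERDICT (by name: the statement is the Claim_ definition above) =====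
theorem n_total_choices_spec : Claim_equal_n_total_choices := by
  intro ol cl mo _ hpre
  unfold Spec_n_total_choices n_total_choices n_total_choices_alt
  dsimp only
  set counts : List Int := ol.map (fun words => (words.length : Int)) with hcounts
  set CP : Int := (cl.map (fun words => (words.length : Int))).foldl (· * ·) 1 with hCP
  set m : Nat := cl.length with hm
  set n : Nat := ol.length with hn
  set e : List Int := esymList counts with he
  -- B side: a range sum
  have hB := enum_sum m mo e 0
  simp only [Nat.cast_zero, Nat.zero_add] at hB
  rw [hB]
  have hlen : e.length = n + 1 := by rw [he, esymList_length, hcounts]; simp [hn]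
  rw [hlen]
  -- A side: fold of adds over the pyRange
  rw [PySem.List.foldl_add]
  -- rewrite the pyRange as a mapped List.range
  have hpre' : (0 : Int) ≤ mo := hpre
  set μ : Nat := mo.toNat with hμ
  have hmo : mo = (μ : Int) := by omega
  rw [hmo, PySem.List.pyRange_one]
  have hK : (((n : Int) + 1) - (μ : Int)).toNat = (n + 1) - μ := by omega
  rw [hK, List.map_map]
  rw [range_ite_sum (fun i => e.getD i 0 * (Nat.factorial (m + i) : Int)) μ (n + 1)]
  rw [← List.sum_map_mul_left, zero_add]
  apply congrArg
  apply List.map_congr_left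
  intro k _
  simp only [Function.comp]
  have hcast : (μ : Int) + (k : Int) = ((μ + k : Nat) : Int) := (Nat.cast_add _ _).symm
  rw [hcast]
  -- each A term at index μ + k
  rw [List.sum_map_mul_right, Int.toNat_natCast]
  have halg : PySem.Int.floordiv (pyFact ((m : Int) + ((μ + k : Nat) : Int))) (pyFact ((m : Int) + ((μ + k : Nat) : Int) - ((μ + k : Nat) : Int))) * (CP * (Nat.factorial m : Int))
      = CP * (Nat.factorial (m + (μ + k)) : Int) := by
    rw [show PySem.Int.floordiv (pyFact ((m : Int) + ((μ + k : Nat) : Int))) (pyFact ((m : Int) + ((μ + k : Nat) : Int) - ((μ + k : Nat) : Int))) * (CP * (Nat.factorial m : Int))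
        = (PySem.Int.floordiv (pyFact ((m : Int) + ((μ + k : Nat) : Int))) (pyFact ((m : Int) + ((μ + k : Nat) : Int) - ((μ + k : Nat) : Int))) * (Nat.factorial m : Int)) * CP by ring,
      fact_fdiv m (μ + k)]
    ring
  rw [halg, he, esym_getD]
  simp only [Ssum]
  ring
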